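-- pv_equiv track=rewrite | github.com/Y-22-0809/Houdini-Agent | houdini_agent/utils/token_optimizer.py | _generate_aggressive_summary
-- ===== SOURCE A (Python) =====
-- from typing import List, Dict, Any, Optional, Tuple
--
-- def _generate_aggressive_summary(messages: List[Dict[str, Any]]) -> str:
--     """生成激进摘要（最大节省）"""
--     parts = ["[历史对话摘要 - 激进压缩]"]
--
--     user_count = sum(1 for m in messages if m.get('role') == 'user')
--     assistant_count = sum(1 for m in messages if m.get('role') == 'assistant')
--     tool_count = sum(1 for m in messages if m.get('role') == 'tool')
--
--     parts.append(f"用户请求: {user_count} 条")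
--     parts.append(f"AI 回复: {assistant_count} 条")
--     if tool_count > 0:
--         parts.append(f"工具调用: {tool_count} 次")
--
--     if messages:
--         last_user = next((m for m in reversed(messages) if m.get('role') == 'user'), None)
--         if last_user:
--             content = last_user.get('content', '')[:100]
--             parts.append(f"\n最后请求: {content.replace(chr(10), ' ')}")
--
--     return "\n".join(parts)
-- ===== SOURCE B (Python) =====
-- from typing import List, Dict, Any
--
-- def _generate_aggressive_summary(messages: List[Dict[str, Any]]) -> str:
--     """Single forward pass: count roles and track the last user message as we go."""
--     user_count = 0
--     assistant_count = 0
--     tool_count = 0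
--     last_user = None
--     for m in messages:
--         role = m.get('role')
--         if role == 'user':
--             user_count += 1
--             last_user = m
--         elif role == 'assistant':
--             assistant_count += 1
--         elif role == 'tool':
--             tool_count += 1
--     parts = [
--         "[历史对话摘要 - 激进压缩]",
--         f"用户请求: {user_count} 条",
--         f"AI 回复: {assistant_count} 条",
--     ]
--     if tool_count > 0:
--         parts.append(f"工具调用: {tool_count} 次")
--     if last_user is not None:
--         content = last_user.get('content', '')[:100]
--         parts.append(f"\n最后请求: {content.replace(chr(10), ' ')}")
--     return "\n".join(parts)
-- ===== Notes on version B (the rewrite author's own statement) =====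
-- stated objective: simpler
-- what changed: Replaces A's four separate scans (three counting generator passes plus a reversed-search for the last user message) with one forward loop maintaining three counters and a last_user variable.
import Mathlib
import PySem

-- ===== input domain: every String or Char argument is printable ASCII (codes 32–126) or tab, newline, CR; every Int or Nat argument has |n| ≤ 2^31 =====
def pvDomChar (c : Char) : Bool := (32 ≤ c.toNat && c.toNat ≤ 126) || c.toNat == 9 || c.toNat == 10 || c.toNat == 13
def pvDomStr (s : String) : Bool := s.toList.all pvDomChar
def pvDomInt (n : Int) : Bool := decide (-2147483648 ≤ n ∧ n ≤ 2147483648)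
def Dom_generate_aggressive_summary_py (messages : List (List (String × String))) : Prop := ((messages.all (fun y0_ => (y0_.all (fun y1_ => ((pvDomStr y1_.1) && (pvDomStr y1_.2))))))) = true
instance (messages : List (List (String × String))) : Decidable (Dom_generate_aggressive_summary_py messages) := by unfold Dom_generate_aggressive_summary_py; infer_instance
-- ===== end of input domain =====

-- B replaces A's four separate scans over messages with one forward loop (objective: simpler).

-- ===== PORT A =====
-- A: three counting passes (sum of 0/1 over the list), then a reversed-search for the last user message.
def generate_aggressive_summary_py (messages : List (List (String × String))) : String :=
  let parts := ["[历史对话摘要 - 激进压缩]"]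
  let user_count : Int :=
    (messages.map (fun m => if (PySem.Dict.mk m).get? "role" = some "user" then (1:Int) else 0)).sum
  let assistant_count : Int :=
    (messages.map (fun m => if (PySem.Dict.mk m).get? "role" = some "assistant" then (1:Int) else 0)).sum
  let tool_count : Int :=
    (messages.map (fun m => if (PySem.Dict.mk m).get? "role" = some "tool" then (1:Int) else 0)).sum
  let parts := parts ++ ["用户请求: " ++ PySem.Int.toStr user_count ++ " 条"]
  let parts := parts ++ ["AI 回复: " ++ PySem.Int.toStr assistant_count ++ " 条"]
  let parts := if tool_count > 0 then parts ++ ["工具调用: " ++ PySem.Int.toStr tool_count ++ " 次"] else parts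
  let parts :=
    if messages ≠ [] then
      -- next((m for m in reversed(messages) if m.get('role') == 'user'), None)
      match messages.reverse.find? (fun m => (PySem.Dict.mk m).get? "role" == some "user") with
      | some last_user =>
          if last_user ≠ [] then  -- Python's `if last_user:` truthiness on the dict
            let content := PySem.Str.slice ((PySem.Dict.mk last_user).getD "content" "") none (some 100)
            parts ++ ["\n最后请求: " ++ PySem.Str.replace content "\n" " "]
          else parts
      | none => parts
    else parts
  PySem.Str.join "\n" parts

-- ===== PORT B =====
-- B: one fold over messages maintaining (user_count, assistant_count, tool_count, last_user).
def pvStepB (st : Int × Int × Int × Option (List (String × String)))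
    (m : List (String × String)) : Int × Int × Int × Option (List (String × String)) :=
  let role := (PySem.Dict.mk m).get? "role"
  if role = some "user" then (st.1 + 1, st.2.1, st.2.2.1, some m)
  else if role = some "assistant" then (st.1, st.2.1 + 1, st.2.2.1, st.2.2.2)
  else if role = some "tool" then (st.1, st.2.1, st.2.2.1 + 1, st.2.2.2)
  else st

def generate_aggressive_summary_py_alt (messages : List (List (String × String))) : String :=
  let st := messages.foldl pvStepB ((0:Int), (0:Int), (0:Int), (none : Option (List (String × String))))
  let parts := ["[历史对话摘要 - 激进压缩]",
                "用户请求: " ++ PySem.Int.toStr st.1 ++ " 条",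
                "AI 回复: " ++ PySem.Int.toStr st.2.1 ++ " 条"]
  let parts := if st.2.2.1 > 0 then parts ++ ["工具调用: " ++ PySem.Int.toStr st.2.2.1 ++ " 次"] else parts
  let parts :=
    match st.2.2.2 with
    | some last_user =>
        parts ++ ["\n最后请求: " ++ PySem.Str.replace
          (PySem.Str.slice ((PySem.Dict.mk last_user).getD "content" "") none (some 100)) "\n" " "]
    | none => parts
  PySem.Str.join "\n" parts

-- ===== PRECONDITION & SPEC =====
def Spec_generate_aggressive_summary_py (messages : List (List (String × String))) (out : String) : Prop := out = generate_aggressive_summary_py_alt messages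
instance (messages : List (List (String × String))) (out : String) : Decidable (Spec_generate_aggressive_summary_py messages out) := by unfold Spec_generate_aggressive_summary_py; infer_instance

-- ===== CLAIM (what is proved, stated in full; the proofs are below) =====
def Claim_equal_generate_aggressive_summary_py : Prop := ∀ (messages : List (List (String × String))), Dom_generate_aggressive_summary_py messages → Spec_generate_aggressive_summary_py messages (generate_aggressive_summary_py messages)

-- ===== LEMMAS AND PROOFS =====

-- B's fold computes A's three 0/1-sums and A's reversed-search, from any accumulator.
theorem pvFoldB_spec (ms : List (List (String × String))) (u a t : Int)
    (l : Option (List (String × String))) :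
    ms.foldl pvStepB (u, a, t, l) =
      (u + (ms.map (fun m => if (PySem.Dict.mk m).get? "role" = some "user" then (1:Int) else 0)).sum,
       a + (ms.map (fun m => if (PySem.Dict.mk m).get? "role" = some "assistant" then (1:Int) else 0)).sum,
       t + (ms.map (fun m => if (PySem.Dict.mk m).get? "role" = some "tool" then (1:Int) else 0)).sum,
       match ms.reverse.find? (fun m => (PySem.Dict.mk m).get? "role" == some "user") with
       | some x => some x
       | none => l) := by
  induction ms generalizing u a t l with
  | nil => simp
  | cons m ms ih =>
    simp only [List.foldl_cons, List.reverse_cons, List.find?_append, List.map_cons, List.sum_cons]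
    rw [pvStepB]
    by_cases hu : (PySem.Dict.mk m).get? "role" = some "user"
    · cases h : ms.reverse.find? (fun m => (PySem.Dict.mk m).get? "role" == some "user") <;>
        simp [hu, ih, h, List.find?] <;> ring_nf
    · by_cases ha : (PySem.Dict.mk m).get? "role" = some "assistant"
      · cases h : ms.reverse.find? (fun m => (PySem.Dict.mk m).get? "role" == some "user") <;>
          simp [ha, ih, h, List.find?] <;> ring_nf
      · have hb : ((PySem.Dict.mk m).get? "role" == some "user") = false := beq_eq_false_iff_ne.mpr hu
        by_cases ht : (PySem.Dict.mk m).get? "role" = some "tool"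
        · cases h : ms.reverse.find? (fun m => (PySem.Dict.mk m).get? "role" == some "user") <;>
            simp [ht, ih, h, List.find?] <;> ring_nf
        · cases h : ms.reverse.find? (fun m => (PySem.Dict.mk m).get? "role" == some "user") <;>
            simp [hu, ha, ht, ih, h, hb, List.find?]

-- a message found by the reversed user-search is a nonempty dict
theorem pvFound_ne_nil (m : List (String × String))
    (h : (PySem.Dict.mk m).get? "role" = some "user") : m ≠ [] := by
  intro hnil
  subst hnil
  simp [PySem.Dict.get?] at h

-- ===== VERDICT (by name: the statement is the Claim_ definition above) =====
theorem generate_aggressive_summary_py_spec : Claim_equal_generate_aggressive_summary_py := by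
  intro messages _
  unfold Spec_generate_aggressive_summary_py generate_aggressive_summary_py generate_aggressive_summary_py_alt
  rw [pvFoldB_spec]
  cases hms : messages with
  | nil => simp
  | cons m0 ms0 =>
    simp only [ne_eq, reduceCtorEq, not_false_eq_true, if_true]
    cases h : (m0 :: ms0).reverse.find?
        (fun m => (PySem.Dict.mk m).get? "role" == some "user") with
    | none => simp
    | some lu =>
      have hlu : (PySem.Dict.mk lu).get? "role" = some "user" := by
        have := List.find?_some h
        simpa using this
      simp [pvFound_ne_nil lu hlu]
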